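-- pv_equiv track=rewrite | github.com/cececombemale/Cipher_analysis | frequency_analysis.py | plausability
-- ===== SOURCE A (Python) =====
-- most_common_order= ''
--
-- not_possible = ''
--
-- def get_message_letter_count(message):
-- 	message_letter_count = dict()
-- 	for l in message:
-- 		if l not in message_letter_count:
-- 			message_letter_count[l] = 1
-- 		else:
-- 			message_letter_count[l] += 1
-- 	return message_letter_count
--
-- def order_frequencies(message,most_common_order):
-- 	letter_freq = get_message_letter_count(message)
--
-- 	freq_letter = dict()
--
-- 	#create an inverted dictionary, frequencies are keys and value
-- 	#is list of letters w that frequency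
-- 	for key in letter_freq.keys():
-- 		if letter_freq[key] not in freq_letter:
-- 			freq_letter[letter_freq[key]] = [key]
--
-- 		else:
-- 			freq_letter[letter_freq[key]].append(key)
--
-- 	#make a list that we can sort by frequency
-- 	ordered_frequencies = []
--
-- 	for key in freq_letter.keys():
-- 		ordered_frequencies.append((key, freq_letter[key]))
--
-- 	ordered_frequencies.sort(key = lambda x: x[0], reverse = True)
--
-- 	for i in range(len(ordered_frequencies)):
-- 		ordered_frequencies[i][1].sort(key=most_common_order.find, reverse = True)
--
-- 	#put the message in most common order form
-- 	ordered_message = ''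
--
-- 	for i in ordered_frequencies:
-- 		for l in i[1]:
-- 			ordered_message += l
-- 	return ordered_message
--
-- def plausability(message,most_common_order):
-- 	order = order_frequencies(message,most_common_order)
--
-- 	score = 0
--
-- 	for l in not_possible:
-- 		if l in order:
-- 			return 0
--
-- 	for l in most_common_order[:12]:
-- 		if l in order[:12]:
-- 			score += 1
-- 	return score
-- ===== SOURCE B (Python) =====
-- def plausability(message, most_common_order):
--     counts = {}
--     for l in message:
--         counts[l] = counts.get(l, 0) + 1
--     letters = sorted(counts, key=lambda l: (-counts[l], -most_common_order.find(l)))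
--     top = ''.join(letters)[:12]
--     return sum(1 for l in most_common_order[:12] if l in top)
-- ===== Notes on version B (the rewrite author's own statement) =====
-- stated objective: simpler
-- what changed: B drops A's inverted frequency->letters dictionary, the list-of-buckets, the two-level sort (buckets by frequency, each bucket in place by find) and the concatenation loop, and instead sorts the distinct letters once by the composite key (-count, -find), relying on sort stability for first-appearance tie-breaking.
import Mathlib
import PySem

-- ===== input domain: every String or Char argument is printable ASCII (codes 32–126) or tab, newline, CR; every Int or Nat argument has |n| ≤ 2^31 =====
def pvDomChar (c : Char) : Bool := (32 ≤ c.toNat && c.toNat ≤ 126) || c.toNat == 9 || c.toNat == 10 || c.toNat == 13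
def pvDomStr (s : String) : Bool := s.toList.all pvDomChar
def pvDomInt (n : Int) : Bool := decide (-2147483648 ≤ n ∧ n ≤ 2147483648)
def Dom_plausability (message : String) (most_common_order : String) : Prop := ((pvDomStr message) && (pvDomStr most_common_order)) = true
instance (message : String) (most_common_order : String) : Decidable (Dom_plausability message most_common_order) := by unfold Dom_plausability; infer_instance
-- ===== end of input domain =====

-- B replaces A's inverted frequency→letters dictionary and two-level sort by one sort of the
-- distinct letters under the composite key (-count, -find, first occurrence); alternative, not faster.

-- ===== PORT A =====
-- module constant: not_possible = '' (most_common_order = '' is shadowed by the parameter)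
def not_possible : List Char := []

def get_message_letter_count (message : String) : PySem.Dict Char Int :=
  message.toList.foldl
    (fun d l => if d.contains l = false then d.insert l 1 else d.insert l (d.getD l 0 + 1))
    PySem.Dict.empty

def order_frequencies (message : String) (most_common_order : String) : List Char :=
  let letter_freq := get_message_letter_count message
  let freq_letter : PySem.Dict Int (List Char) :=
    letter_freq.keys.foldl
      (fun d key =>
        if d.contains (letter_freq.getD key 0) = false then
          d.insert (letter_freq.getD key 0) [key]
        else
          d.insert (letter_freq.getD key 0) (d.getD (letter_freq.getD key 0) [] ++ [key]))
      PySem.Dict.empty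
  let ordered_frequencies : List (Int × List Char) :=
    freq_letter.keys.foldl (fun acc key => acc ++ [(key, freq_letter.getD key [])]) []
  let ordered_frequencies := PySem.List.sorted ordered_frequencies (fun x => x.1) true
  -- 'for i in range(len(...)): ordered_frequencies[i][1].sort(key=most_common_order.find, reverse=True)'
  let ordered_frequencies := ordered_frequencies.map
      (fun p => (p.1, PySem.List.sorted p.2 (fun l => PySem.Chars.find most_common_order.toList [l]) true))
  -- 'for i in ordered_frequencies: for l in i[1]: ordered_message += l'  (strings kept as List Char)
  ordered_frequencies.foldl (fun om p => p.2.foldl (fun om l => om ++ [l]) om) []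

def plausability (message : String) (most_common_order : String) : Int :=
  let order := order_frequencies message most_common_order
  let score : Int := 0
  -- 'for l in not_possible: if l in order: return 0' (the loop can only return 0)
  if not_possible.any (fun l => PySem.Chars.isIn [l] order) then 0
  else
    (PySem.List.slice most_common_order.toList none (some 12)).foldl
      (fun score l =>
        if PySem.Chars.isIn [l] (PySem.List.slice order none (some 12)) then score + 1 else score)
      score

-- ===== PORT B =====
def plausability_alt (message : String) (most_common_order : String) : Int :=
  -- 'for l in message: counts[l] = counts.get(l, 0) + 1'
  let counts := message.toList.foldl (fun d l => d.insert l (d.getD l 0 + 1)) PySem.Dict.empty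
  -- 'sorted(counts, key=lambda l: (-counts[l], -most_common_order.find(l)))' (tuple key, stable)
  let letters := PySem.List.sorted2 counts.keys
      (fun l => -(counts.getD l 0))
      (fun l => -(PySem.Chars.find most_common_order.toList [l]))
  let top := PySem.List.slice letters none (some 12)
  -- 'sum(1 for l in most_common_order[:12] if l in top)'
  ((PySem.List.slice most_common_order.toList none (some 12)).map
      (fun l => if PySem.Chars.isIn [l] top then (1 : Int) else 0)).sum

-- ===== PRECONDITION & SPEC =====
def Spec_plausability (message : String) (most_common_order : String) (out : Int) : Prop := out = plausability_alt message most_common_order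
instance (message : String) (most_common_order : String) (out : Int) : Decidable (Spec_plausability message most_common_order out) := by unfold Spec_plausability; infer_instance

-- ===== CLAIM (what is proved, stated in full; the proofs are below) =====
def Claim_equal_plausability : Prop := ∀ (message : String) (most_common_order : String), Dom_plausability message most_common_order → Spec_plausability message most_common_order (plausability message most_common_order)

-- ===== LEMMAS AND PROOFS =====

-- B's counting dict (= A's letter_freq, proved in pv_letter_freq)
def pvCounts (msg : List Char) : PySem.Dict Char Int :=
  msg.foldl (fun d l => d.insert l (d.getD l 0 + 1)) PySem.Dict.empty

-- the strict "composite key + original position" order both programs' outputs satisfy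
def pvR {α : Type} (k1 k2 pos : α → Int) (a b : α) : Prop :=
  k1 a < k1 b ∨ (k1 a = k1 b ∧ (k2 a < k2 b ∨ (k2 a = k2 b ∧ pos a < pos b)))

lemma pv_insertBy_pairwise {α : Type} (before : α → α → Bool) (R : α → α → Prop) (pos : α → Int)
    (x : α)
    (H1 : ∀ y, before x y = true → R x y)
    (H3 : ∀ y, before x y = false → pos y < pos x → R y x)
    (Htr : ∀ y z, before x y = true → R y z → R x z) :
    ∀ (acc : List α), acc.Pairwise R → (∀ y ∈ acc, pos y < pos x) →
    (PySem.List.insertBy before x acc).Pairwise R := by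
  intro acc
  induction acc with
  | nil => intro _ _; simp [PySem.List.insertBy]
  | cons y ys ih =>
    intro hacc hpos
    rw [show PySem.List.insertBy before x (y :: ys) =
        if before x y then x :: y :: ys else y :: PySem.List.insertBy before x ys by
      simp [PySem.List.insertBy]]
    rcases List.pairwise_cons.mp hacc with ⟨hyys, hys⟩
    by_cases hb : before x y = true
    · rw [if_pos hb]
      refine List.pairwise_cons.mpr ⟨?_, hacc⟩
      intro z hz
      rcases List.mem_cons.mp hz with rfl | hz
      · exact H1 z hb
      · exact Htr y z hb (hyys z hz)
    · rw [if_neg hb]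
      refine List.pairwise_cons.mpr ⟨?_, ih hys (fun z hz => hpos z (List.mem_cons_of_mem y hz))⟩
      intro z hz
      rcases (PySem.List.mem_insertBy before x z ys).mp hz with rfl | hz
      · exact H3 y (Bool.not_eq_true _ ▸ hb) (hpos y List.mem_cons_self)
      · exact hyys z hz

lemma pv_foldl_insertBy_pairwise {α : Type} (before : α → α → Bool) (R : α → α → Prop) (pos : α → Int)
    (H1 : ∀ x y, before x y = true → R x y)
    (H3 : ∀ x y, before x y = false → pos y < pos x → R y x)
    (Htr : ∀ x y z, before x y = true → R y z → R x z) :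
    ∀ (xs acc : List α), xs.Pairwise (fun a b => pos a < pos b) → acc.Pairwise R →
    (∀ y ∈ acc, ∀ x ∈ xs, pos y < pos x) →
    (xs.foldl (fun acc x => PySem.List.insertBy before x acc) acc).Pairwise R := by
  intro xs
  induction xs with
  | nil => intro acc _ hacc _; simpa using hacc
  | cons x xs ih =>
    intro acc hxs hacc hcross
    rcases List.pairwise_cons.mp hxs with ⟨hxxs, hxs'⟩
    simp only [List.foldl_cons]
    refine ih _ hxs' ?_ ?_
    · exact pv_insertBy_pairwise before R pos x (H1 x) (H3 x) (Htr x) acc hacc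
        (fun y hy => hcross y hy x List.mem_cons_self)
    · intro y hy z hz
      rcases (PySem.List.mem_insertBy before x y acc).mp hy with rfl | hy
      · exact hxxs z hz
      · exact hcross y hy z (List.mem_cons_of_mem x hz)

-- A's inner (stable, reversed) sort: output ordered by key desc, ties by original position
lemma pv_inner_pairwise {α : Type} (key pos : α → Int) (xs : List α)
    (h : xs.Pairwise (fun a b => pos a < pos b)) :
    (PySem.List.sorted xs key true).Pairwise
      (fun a b => key b < key a ∨ (key a = key b ∧ pos a < pos b)) := by
  rw [PySem.List.sorted_rev_eq_foldl_insertBy]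
  refine pv_foldl_insertBy_pairwise _ _ pos ?_ ?_ ?_ xs [] h List.Pairwise.nil (by simp)
  · intro x y hb; left; exact of_decide_eq_true hb
  · intro x y hb hp
    have := of_decide_eq_false hb
    rcases lt_or_eq_of_le (not_lt.mp this) with h' | h'
    · left; exact h'
    · right; exact ⟨h'.symm, hp⟩
  · intro x y z hb hyz
    have hxy := of_decide_eq_true hb
    rcases hyz with h' | ⟨h1, _⟩
    · left; exact h'.trans hxy
    · left; exact h1 ▸ hxy

-- B's stable two-key sort: output strictly ordered by (k1, k2, original position)
lemma pv_sorted2_pairwise {α : Type} (k1 k2 pos : α → Int) (xs : List α)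
    (h : xs.Pairwise (fun a b => pos a < pos b)) :
    (PySem.List.sorted2 xs k1 k2).Pairwise (pvR k1 k2 pos) := by
  rw [show PySem.List.sorted2 xs k1 k2 =
      xs.foldl (fun acc x => PySem.List.insertBy
        (fun a b => decide (k1 a < k1 b) || !decide (k1 b < k1 a) && decide (k2 a < k2 b)) x acc) []
      from rfl]
  refine pv_foldl_insertBy_pairwise _ _ pos ?_ ?_ ?_ xs [] h List.Pairwise.nil (by simp)
  · intro x y hb
    simp only [Bool.or_eq_true, Bool.and_eq_true, Bool.not_eq_true', decide_eq_true_eq,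
      decide_eq_false_iff_not] at hb
    unfold pvR; omega
  · intro x y hb hp
    simp only [Bool.or_eq_false_iff, Bool.and_eq_false_iff, Bool.not_eq_false', decide_eq_true_eq,
      decide_eq_false_iff_not] at hb
    unfold pvR; omega
  · intro x y z hb hyz
    simp only [Bool.or_eq_true, Bool.and_eq_true, Bool.not_eq_true', decide_eq_true_eq,
      decide_eq_false_iff_not] at hb
    unfold pvR at hyz ⊢; omega

lemma pv_set_update_nil {α : Type} [BEq α] (xs : List α) :
    PySem.Set.update ([] : PySem.Set α) xs = PySem.Set.ofList xs := by
  rw [PySem.Set.ofList_eq_foldl]; rfl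

lemma pv_nodup_pairwise_idxOf {α : Type} [DecidableEq α] (l : List α) (h : l.Nodup) :
    l.Pairwise (fun a b => (l.idxOf a : Int) < (l.idxOf b : Int)) := by
  rw [List.pairwise_iff_getElem]
  intro i j hi hj hij
  rw [List.Nodup.idxOf_getElem h i hi, List.Nodup.idxOf_getElem h j hj]
  exact_mod_cast hij

lemma pv_letter_freq (message : String) :
    get_message_letter_count message = pvCounts message.toList := by
  unfold get_message_letter_count pvCounts
  refine PySem.List.foldl_congr_mem _ _ _ _ ?_
  intro acc x _
  by_cases h : acc.contains x = true
  · simp [h]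
  · rw [if_pos (by simpa using h), PySem.Dict.getD_of_not_contains acc 0 (by simpa using h)]
    norm_num

-- the central fact: A's grouped two-level sort equals B's single composite-key sort
lemma pv_main (message most_common_order : String) :
    order_frequencies message most_common_order =
    PySem.List.sorted2 (pvCounts message.toList).keys
      (fun l => -((pvCounts message.toList).getD l 0))
      (fun l => -(PySem.Chars.find most_common_order.toList [l])) := by
  simp only [order_frequencies, pv_letter_freq]
  set C := pvCounts message.toList with hCdef
  set mc := most_common_order.toList with hmcdef
  set pos : Char → Int := fun c => ((PySem.Set.ofList message.toList).idxOf c : Int) with hposdef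
  -- A's freq_letter loop is a modify-fold
  have hfl : C.keys.foldl (fun d key =>
        if d.contains (C.getD key 0) = false then d.insert (C.getD key 0) [key]
        else d.insert (C.getD key 0) (d.getD (C.getD key 0) [] ++ [key])) PySem.Dict.empty
      = C.keys.foldl (fun d key => d.modify (C.getD key 0) [] (fun v => v ++ [key]))
          PySem.Dict.empty := by
    refine PySem.List.foldl_congr_mem _ _ _ _ ?_
    intro d k _
    by_cases h : d.contains (C.getD k 0) = true
    · simp [h, PySem.Dict.modify]
    · rw [if_pos (by simpa using h)]
      simp [PySem.Dict.modify, PySem.Dict.getD_of_not_contains d [] (by simpa using h)]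
  rw [hfl]
  set FL := C.keys.foldl (fun d key => d.modify (C.getD key 0) [] (fun v => v ++ [key]))
      PySem.Dict.empty with hFLdef
  -- each bucket of freq_letter is a filter of the letter list, in original order
  have hgroup : ∀ v, FL.getD v [] = C.keys.filter (fun k => C.getD k 0 == v) := by
    intro v
    rw [hFLdef, show C.keys.foldl
          (fun d key => d.modify (C.getD key 0) [] (fun v => v ++ [key])) PySem.Dict.empty
        = (C.keys.map (fun k => (C.getD k 0, k))).foldl
            (fun d p => d.modify p.1 [] (fun v => v ++ [p.2])) PySem.Dict.empty from
        (List.foldl_map (f := fun k : Char => (C.getD k 0, k))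
          (g := fun (d : PySem.Dict Int (List Char)) (p : Int × Char) =>
            d.modify p.1 [] (fun v => v ++ [p.2]))
          (l := C.keys) (init := PySem.Dict.empty)).symm]
    rw [PySem.Dict.getD_foldl_modify_append]
    simp [List.filter_map, Function.comp_def]
  have hkeysC : C.keys = PySem.Set.ofList message.toList := by
    rw [hCdef]
    rw [show pvCounts message.toList
        = message.toList.foldl (fun d l => d.insert l (d.getD l 0 + 1)) PySem.Dict.empty from rfl]
    rw [PySem.Dict.keys_foldl_insert message.toList (fun d x => d.getD x 0 + 1) PySem.Dict.empty]
    rw [PySem.Dict.keys_empty, pv_set_update_nil]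
  have hndC : C.keys.Nodup := by rw [hkeysC]; exact PySem.Set.nodup_ofList _
  have hFkeys : FL.keys = PySem.Set.ofList (C.keys.map (fun k => C.getD k 0)) := by
    rw [hFLdef, PySem.Dict.keys_foldl_modify_key C.keys (fun k => C.getD k 0) []
      (fun _ x => fun v => v ++ [x]) PySem.Dict.empty, PySem.Dict.keys_empty, pv_set_update_nil]
  have hndF : FL.keys.Nodup := by rw [hFkeys]; exact PySem.Set.nodup_ofList _
  -- the ordered_frequencies list before sorting
  rw [show FL.keys.foldl (fun acc key => acc ++ [(key, FL.getD key [])]) []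
      = FL.keys.map (fun v => (v, FL.getD v [])) by
    simpa using PySem.List.foldl_append_singleton_eq_map (fun v => (v, FL.getD v [])) FL.keys []]
  simp only [hgroup]
  set g : Int → List Char := fun v => C.keys.filter (fun k => C.getD k 0 == v) with hgdef
  set S := PySem.List.sorted (FL.keys.map (fun v => (v, g v))) (fun x => x.1) true with hSdef
  -- flatten the double loop
  rw [show List.foldl (fun om p => List.foldl (fun om l => om ++ [l]) om p.2) []
        (S.map (fun p => (p.1, PySem.List.sorted p.2 (fun l => PySem.Chars.find mc [l]) true)))
      = List.foldl (fun om p => om ++ p.2) []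
        (S.map (fun p => (p.1, PySem.List.sorted p.2 (fun l => PySem.Chars.find mc [l]) true))) from
    PySem.List.foldl_congr_mem _ _ _ _
      (fun acc p _ => PySem.List.foldl_append_singleton_eq_self p.2 acc)]
  rw [PySem.List.foldl_append_eq_flatMap]
  simp only [List.nil_append, List.flatMap_map]
  -- facts about S
  have hSperm : S.Perm (FL.keys.map (fun v => (v, g v))) := PySem.List.sorted_perm _ _ _
  have hSmem : ∀ p ∈ S, p.2 = g p.1 ∧ p.1 ∈ FL.keys := by
    intro p hp
    rcases List.mem_map.mp (hSperm.mem_iff.mp hp) with ⟨v, hv, rfl⟩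
    exact ⟨rfl, hv⟩
  have hmemg : ∀ (v : Int), ∀ x ∈ g v, C.getD x 0 = v ∧ x ∈ C.keys := by
    intro v x hx
    rcases List.mem_filter.mp hx with ⟨h1, h2⟩
    exact ⟨by simpa using h2, h1⟩
  have hSpairfst : S.Pairwise (fun p q => q.1 < p.1) := by
    have hle : S.Pairwise (fun p q => q.1 ≤ p.1) :=
      PySem.List.sorted_pairwise_rev (FL.keys.map (fun v => (v, g v))) (fun x => x.1)
    have hmapperm : (S.map (fun x => x.1)).Perm FL.keys := by
      have := hSperm.map (fun x : Int × List Char => x.1)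
      simpa [List.map_map, Function.comp_def] using this
    have hnd : (S.map (fun x => x.1)).Nodup := hmapperm.nodup_iff.mpr hndF
    have hne : S.Pairwise (fun p q => p.1 ≠ q.1) := List.pairwise_map.mp hnd
    exact (hle.and hne).imp (fun h => lt_of_le_of_ne h.1 h.2.symm)
  -- pairwise position order on the distinct letters
  have hpos : C.keys.Pairwise (fun a b => pos a < pos b) := by
    rw [hkeysC]
    exact pv_nodup_pairwise_idxOf _ (PySem.Set.nodup_ofList _)
  -- A's flattened output is strictly ordered by the composite key
  have hApair : (S.flatMap (fun p => PySem.List.sorted p.2 (fun l => PySem.Chars.find mc [l]) true)).Pairwise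
      (pvR (fun l => -(C.getD l 0)) (fun l => -(PySem.Chars.find mc [l])) pos) := by
    refine List.pairwise_flatMap.mpr ⟨?_, ?_⟩
    · intro p hp
      have hsub : p.2.Sublist C.keys := by
        rw [(hSmem p hp).1, hgdef]; exact List.filter_sublist
      have hppos : p.2.Pairwise (fun a b => pos a < pos b) := List.Pairwise.sublist hsub hpos
      have hinner := pv_inner_pairwise (fun l => PySem.Chars.find mc [l]) pos p.2 hppos
      refine hinner.imp_of_mem ?_
      intro a b ha hb hr
      have hamem := (PySem.List.sorted_perm p.2 (fun l => PySem.Chars.find mc [l]) true).mem_iff.mp ha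
      have hbmem := (PySem.List.sorted_perm p.2 (fun l => PySem.Chars.find mc [l]) true).mem_iff.mp hb
      have ha' := hmemg p.1 a ((hSmem p hp).1 ▸ hamem)
      have hb' := hmemg p.1 b ((hSmem p hp).1 ▸ hbmem)
      have hca := ha'.1
      have hcb := hb'.1
      unfold pvR
      beta_reduce
      beta_reduce at hr
      omega
    · refine hSpairfst.imp_of_mem ?_
      intro p q hpS hqS hlt x hx y hy
      have hx' := hmemg p.1 x ((hSmem p hpS).1 ▸ (PySem.List.sorted_perm _ _ _).mem_iff.mp hx)
      have hy' := hmemg q.1 y ((hSmem q hqS).1 ▸ (PySem.List.sorted_perm _ _ _).mem_iff.mp hy)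
      have hcx := hx'.1
      have hcy := hy'.1
      unfold pvR
      beta_reduce
      omega
  -- A's flattened output is a permutation of the distinct letters
  have hAperm : (S.flatMap (fun p => PySem.List.sorted p.2 (fun l => PySem.Chars.find mc [l]) true)).Perm
      C.keys := by
    have h1 : (S.flatMap (fun p => PySem.List.sorted p.2 (fun l => PySem.Chars.find mc [l]) true)).Perm
        ((FL.keys.map (fun v => (v, g v))).flatMap (fun p => p.2)) :=
      List.Perm.flatMap hSperm (fun a _ => PySem.List.sorted_perm _ _ _)
    have h2 : ((FL.keys.map (fun v => (v, g v))).flatMap (fun p => p.2)) = FL.keys.flatMap g := by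
      rw [List.flatMap_map]
    have h3 : (FL.keys.flatMap g).Perm C.keys := by
      apply List.perm_of_nodup_nodup_toFinset_eq
      · refine List.nodup_flatMap.mpr ⟨fun v _ => hndC.filter _, ?_⟩
        refine hndF.imp ?_
        intro v w hvw x hxv hxw
        have h1 := hmemg v x hxv
        have h2 := hmemg w x hxw
        exact hvw (h1.1 ▸ h2.1)
      · exact hndC
      · apply Finset.ext
        intro a
        simp only [List.mem_toFinset, List.mem_flatMap]
        constructor
        · rintro ⟨v, _, hv⟩; exact (hmemg v a hv).2
        · intro ha
          refine ⟨C.getD a 0, ?_, ?_⟩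
          · rw [hFkeys]
            exact (PySem.Set.mem_ofList _ _).mpr (List.mem_map.mpr ⟨a, ha, rfl⟩)
          · rw [hgdef]
            exact List.mem_filter.mpr ⟨ha, by simp⟩
    exact h1.trans (h2 ▸ h3)
  -- B's sort is strictly ordered by the same composite key, and also a permutation of the letters
  have hBpair := pv_sorted2_pairwise (fun l => -(C.getD l 0))
      (fun l => -(PySem.Chars.find mc [l])) pos C.keys hpos
  have hBperm := PySem.List.sorted2_perm C.keys (fun l => -(C.getD l 0))
      (fun l => -(PySem.Chars.find mc [l])) false
  -- a strict order has at most one ordered rearrangement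
  refine List.Perm.eq_of_pairwise ?_ hApair hBpair (hAperm.trans hBperm.symm)
  intro a b _ _ hab hba
  exfalso
  unfold pvR at hab hba
  beta_reduce at hab hba
  omega

-- ===== VERDICT (by name: the statement is the Claim_ definition above) =====
theorem plausability_spec : Claim_equal_plausability := by
  intro message most_common_order _
  unfold Spec_plausability plausability plausability_alt
  simp only [not_possible, List.any_nil, Bool.false_eq_true, if_false, pv_main]
  rw [show (pvCounts message.toList) =
        message.toList.foldl (fun d l => d.insert l (d.getD l 0 + 1)) PySem.Dict.empty from rfl]
  rw [PySem.List.foldl_if_add_one, PySem.List.sum_map_ite_one_zero, zero_add]
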